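-- pv_equiv track=rewrite | github.com/upadhayayarajesh/DataStructureAndAlgorithm | array/max_even_odd_subarray.py | max_even_odd_subarray
-- ===== SOURCE A (Python) =====
-- def max_even_odd_subarray(arr):
--     """
--     Find the maximum even odd subarray within an array
--     Time Complexity: O(N)
--     Space Complexity: O(1)
--     :param arr: Array
--     :return: Integer
--     """
--     max_even_orr = 1
--     prev_even_orr = 1
--     for i in range(1, len(arr)):
--         if (arr[i - 1] % 2 != 0 and arr[i] % 2 == 0) or (arr[i - 1] % 2 == 0 and arr[i] % 2 == 1):
--             max_even_orr = max_even_orr + 1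
--             prev_even_orr = max(prev_even_orr, max_even_orr)
--         else:
--             max_even_orr = 1
--     return prev_even_orr
-- ===== SOURCE B (Python) =====
-- def max_even_odd_subarray(arr):
--     # Break-position method: collect the cut points where the even/odd alternation
--     # breaks, then return the largest distance between consecutive cut points
--     # (at least 1). No running counter is maintained.
--     cuts = [0]
--     for i in range(1, len(arr)):
--         if not ((arr[i - 1] % 2 != 0 and arr[i] % 2 == 0) or (arr[i - 1] % 2 == 0 and arr[i] % 2 == 1)):
--             cuts.append(i)
--     cuts.append(len(arr))
--     return max(max(q - p for p, q in zip(cuts, cuts[1:])), 1)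
-- ===== Notes on version B (the rewrite author's own statement) =====
-- stated objective: alternative
-- what changed: B maintains no running counter: it collects the list of cut positions where the even/odd alternation breaks and returns the largest difference between consecutive cut points (floored at 1), instead of A's single pass that increments and inline-resets a counter while tracking its max.
import Mathlib
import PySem

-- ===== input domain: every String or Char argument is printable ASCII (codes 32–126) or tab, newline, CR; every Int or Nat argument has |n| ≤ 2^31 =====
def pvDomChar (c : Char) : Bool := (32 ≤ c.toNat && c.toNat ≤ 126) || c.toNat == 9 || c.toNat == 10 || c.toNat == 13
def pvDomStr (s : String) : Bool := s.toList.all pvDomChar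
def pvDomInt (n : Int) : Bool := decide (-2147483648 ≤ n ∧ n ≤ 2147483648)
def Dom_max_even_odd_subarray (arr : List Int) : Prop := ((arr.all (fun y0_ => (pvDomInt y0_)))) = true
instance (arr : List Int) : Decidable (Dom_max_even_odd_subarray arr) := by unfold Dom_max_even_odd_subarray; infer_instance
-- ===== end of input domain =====

-- B keeps no running counter: it records the cut positions where the alternation breaks and
-- returns the largest gap between consecutive cut points (objective: alternative; same O(n)).

-- ===== PORT A =====
-- A's loop over range(1, len(arr)) with state (max_even_orr, prev_even_orr).
-- arr[i-1] / arr[i] are always in range for i in range(1, len(arr)), so pyGetD is exact here.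
def max_even_odd_subarray (arr : List Int) : Int :=
  ((PySem.List.pyRange 1 (PySem.List.len arr) 1).foldl
    (fun (st : Int × Int) i =>
      if ((PySem.Int.mod (PySem.List.pyGetD arr (i - 1) 0) 2 != 0 &&
           PySem.Int.mod (PySem.List.pyGetD arr i 0) 2 == 0) ||
          (PySem.Int.mod (PySem.List.pyGetD arr (i - 1) 0) 2 == 0 &&
           PySem.Int.mod (PySem.List.pyGetD arr i 0) 2 == 1))
      then (st.1 + 1, max st.2 (st.1 + 1))
      else (1, st.2))
    (1, 1)).2

-- ===== PORT B =====
-- cuts = [0]; for i in range(1, len(arr)): if not trans: cuts.append(i); cuts.append(len(arr));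
-- return max(max(q - p for p, q in zip(cuts, cuts[1:])), 1).
-- The zipped gap list is never empty (cuts has ≥ 2 elements), so max?.getD 0 is exact for max().
def max_even_odd_subarray_alt (arr : List Int) : Int :=
  let n := PySem.List.len arr
  let cuts :=
    (PySem.List.pyRange 1 n 1).foldl
      (fun (acc : List Int) i =>
        if !((PySem.Int.mod (PySem.List.pyGetD arr (i - 1) 0) 2 != 0 &&
              PySem.Int.mod (PySem.List.pyGetD arr i 0) 2 == 0) ||
             (PySem.Int.mod (PySem.List.pyGetD arr (i - 1) 0) 2 == 0 &&
              PySem.Int.mod (PySem.List.pyGetD arr i 0) 2 == 1))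
        then acc ++ [i] else acc)
      [0]
  let cuts := cuts ++ [n]
  max ((PySem.List.max? ((cuts.zip cuts.tail).map (fun p : Int × Int => p.2 - p.1))
        (fun x => x)).getD 0) 1

-- ===== PRECONDITION & SPEC =====
def Spec_max_even_odd_subarray (arr : List Int) (out : Int) : Prop := out = max_even_odd_subarray_alt arr
instance (arr : List Int) (out : Int) : Decidable (Spec_max_even_odd_subarray arr out) := by unfold Spec_max_even_odd_subarray; infer_instance

-- ===== CLAIM (what is proved, stated in full; the proofs are below) =====
def Claim_equal_max_even_odd_subarray : Prop := ∀ (arr : List Int), Dom_max_even_odd_subarray arr → Spec_max_even_odd_subarray arr (max_even_odd_subarray arr)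

-- ===== LEMMAS AND PROOFS =====

-- the shared parity-transition test, as a Bool on a pair
def pvTrans (p : Int × Int) : Bool :=
  (PySem.Int.mod p.1 2 != 0 && PySem.Int.mod p.2 2 == 0) ||
  (PySem.Int.mod p.1 2 == 0 && PySem.Int.mod p.2 2 == 1)

-- the transition list of arr
def pvTs (arr : List Int) : List Bool := (arr.zip arr.tail).map pvTrans

-- A's loop body, named for the proofs
def pvStepA (st : Int × Int) (t : Bool) : Int × Int :=
  if t then (st.1 + 1, max st.2 (st.1 + 1)) else (1, st.2)

-- B's cut-list fold, re-expressed over the transition list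
def pvCutsF (ts : List Bool) : List Int :=
  (List.range ts.length).foldl
    (fun acc k => if !(ts.getD k false) then acc ++ [(k : Int) + 1] else acc) [0]

-- adjacent gaps and their max (0 on the empty list), matching B's tail computation
def pvGaps (l : List Int) : List Int := (l.zip l.tail).map (fun p : Int × Int => p.2 - p.1)
def pvGm (g : List Int) : Int := (PySem.List.max? g (fun x => x)).getD 0
def pvLast (l : List Int) : Int := l.getLast?.getD 0

theorem pv_last_concat (l : List Int) (x : Int) : pvLast (l ++ [x]) = x := by
  simp [pvLast]

theorem pv_gm_cons (a : Int) (t : List Int) : pvGm (a :: t) = t.foldl max a := by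
  simp [pvGm, PySem.List.max?_id_cons]

theorem pv_gm_concat (g : List Int) (d : Int) :
    pvGm (g ++ [d]) = if g.isEmpty then d else max (pvGm g) d := by
  cases g with
  | nil => simp [pv_gm_cons]
  | cons a t => simp [pv_gm_cons, List.foldl_append]

theorem pv_gaps_concat (l : List Int) (x : Int) (h : l ≠ []) :
    pvGaps (l ++ [x]) = pvGaps l ++ [x - pvLast l] := by
  induction l with
  | nil => exact absurd rfl h
  | cons a t ih =>
    cases t with
    | nil => simp [pvGaps, pvLast]
    | cons b r =>
      have ih2 := ih (by simp)
      simp only [pvGaps, List.cons_append, List.tail_cons, List.zip_cons_cons,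
        List.map_cons] at ih2 ⊢
      have hl : pvLast (a :: b :: r) = pvLast (b :: r) := by simp [pvLast]
      rw [hl]
      exact congrArg (List.cons (b - a)) ih2

theorem pv_cutsF_ne_nil (ts : List Bool) : pvCutsF ts ≠ [] := by
  unfold pvCutsF
  rw [PySem.List.foldl_append_if]
  simp

theorem pv_cutsF_concat (ts : List Bool) (t : Bool) :
    pvCutsF (ts ++ [t]) = if t then pvCutsF ts else pvCutsF ts ++ [(ts.length : Int) + 1] := by
  unfold pvCutsF
  rw [show (ts ++ [t]).length = ts.length + 1 by simp, List.range_succ, List.foldl_append]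
  have hcongr : (List.range ts.length).foldl
      (fun acc k => if !((ts ++ [t]).getD k false) then acc ++ [(k : Int) + 1] else acc) [0]
      = (List.range ts.length).foldl
      (fun acc k => if !(ts.getD k false) then acc ++ [(k : Int) + 1] else acc) [0] := by
    refine PySem.List.foldl_congr_mem _ _ _ _ (fun acc k hk => ?_)
    have hk2 : k < ts.length := List.mem_range.mp hk
    rw [List.getD_append _ _ _ _ hk2]
  rw [hcongr]
  have hL : (ts ++ [t]).getD ts.length false = t := by
    rw [List.getD_append_right _ _ _ _ (le_refl _)]
    simp
  rw [List.foldl_cons, List.foldl_nil, hL]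
  cases t <;> simp

-- the invariant of the two loops: A's running counter is the distance to the last cut,
-- and A's best-so-far is the max gap of the cut list closed off at the current position
theorem pvStepA_true (st : Int × Int) : pvStepA st true = (st.1 + 1, max st.2 (st.1 + 1)) := rfl
theorem pvStepA_false (st : Int × Int) : pvStepA st false = (1, st.2) := rfl

theorem pv_inv (ts : List Bool) :
    0 ≤ pvLast (pvCutsF ts) ∧ pvLast (pvCutsF ts) ≤ (ts.length : Int) ∧
    (ts.foldl pvStepA (1, 1)).1 = (ts.length : Int) + 1 - pvLast (pvCutsF ts) ∧
    (ts.foldl pvStepA (1, 1)).2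
      = max (pvGm (pvGaps (pvCutsF ts ++ [(ts.length : Int) + 1]))) 1 := by
  induction ts using List.reverseRecOn with
  | nil => decide
  | append_singleton ts t ih =>
    obtain ⟨h0, hle, hcur, hbest⟩ := ih
    have hne : pvCutsF ts ≠ [] := pv_cutsF_ne_nil ts
    have hLlen : ((ts ++ [t]).length : Int) = (ts.length : Int) + 1 := by
      simp
    have hgaps1 : pvGaps (pvCutsF ts ++ [(ts.length : Int) + 1])
        = pvGaps (pvCutsF ts) ++ [(ts.length : Int) + 1 - pvLast (pvCutsF ts)] :=
      pv_gaps_concat _ _ hne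
    rw [List.foldl_append, List.foldl_cons, List.foldl_nil, pv_cutsF_concat, hLlen]
    cases t with
    | true =>
      rw [if_pos rfl]
      have hgaps2 : pvGaps (pvCutsF ts ++ [(ts.length : Int) + 1 + 1])
          = pvGaps (pvCutsF ts) ++ [(ts.length : Int) + 1 + 1 - pvLast (pvCutsF ts)] :=
        pv_gaps_concat _ _ hne
      refine ⟨h0, by omega, ?_, ?_⟩
      · rw [pvStepA_true]
        simp only [hcur]
        omega
      · rw [pvStepA_true, hgaps2, pv_gm_concat]
        simp only [hbest, hcur, hgaps1, pv_gm_concat]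
        cases hg : (pvGaps (pvCutsF ts)).isEmpty <;> simp only [Bool.false_eq_true,
          if_true, if_false] <;> omega
    | false =>
      rw [if_neg (by simp)]
      have hne2 : pvCutsF ts ++ [(ts.length : Int) + 1] ≠ [] := by simp
      have hgaps2 : pvGaps ((pvCutsF ts ++ [(ts.length : Int) + 1]) ++ [(ts.length : Int) + 1 + 1])
          = pvGaps (pvCutsF ts ++ [(ts.length : Int) + 1])
            ++ [(ts.length : Int) + 1 + 1 - ((ts.length : Int) + 1)] := by
        rw [pv_gaps_concat _ _ hne2, pv_last_concat]
      refine ⟨by rw [pv_last_concat]; omega, by rw [pv_last_concat], ?_, ?_⟩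
      · rw [pvStepA_false, pv_last_concat]
        simp
      · rw [pvStepA_false, hgaps2, pv_gm_concat, hgaps1]
        rw [if_neg (by simp)]
        simp only [hbest, hgaps1, pv_gm_concat]
        cases hg : (pvGaps (pvCutsF ts)).isEmpty <;> simp only [Bool.false_eq_true,
          if_true, if_false] <;> omega

theorem pv_ts_len (arr : List Int) : (pvTs arr).length = arr.length - 1 := by
  simp [pvTs]

-- an index fold over range(len(arr)-1) reading arr[k], arr[k+1] is a fold over adjacent pairs
theorem range_getD_zip {σ : Type} (f : σ → Int → Int → σ) :
    ∀ (arr : List Int) (s : σ),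
      (List.range (arr.length - 1)).foldl (fun st k => f st (arr.getD k 0) (arr.getD (k + 1) 0)) s
        = (arr.zip arr.tail).foldl (fun st p => f st p.1 p.2) s := by
  intro arr
  induction arr with
  | nil => intro s; simp
  | cons x xs ih =>
    intro s
    cases xs with
    | nil => simp
    | cons y r =>
      have hlen : (x :: y :: r).length - 1 = r.length + 1 := by simp
      rw [hlen, List.range_succ_eq_map, List.foldl_cons, List.foldl_map]
      simp only [List.getD_cons_zero, List.getD_cons_succ]
      have ih' := ih (f s x y)
      simp only [List.length_cons, Nat.add_sub_cancel, List.getD_cons_succ] at ih'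
      rw [ih']
      simp

-- A's port is the pvStepA fold over the transition list
theorem pv_redA (arr : List Int) :
    max_even_odd_subarray arr = ((pvTs arr).foldl pvStepA (1, 1)).2 := by
  unfold max_even_odd_subarray pvTs
  rw [PySem.List.len_eq, PySem.List.pyRange_one, List.foldl_map]
  have hfun : (fun (st : Int × Int) (k : Nat) =>
      if ((PySem.Int.mod (PySem.List.pyGetD arr ((1 : Int) + ↑k - 1) 0) 2 != 0 &&
           PySem.Int.mod (PySem.List.pyGetD arr ((1 : Int) + ↑k) 0) 2 == 0) ||
          (PySem.Int.mod (PySem.List.pyGetD arr ((1 : Int) + ↑k - 1) 0) 2 == 0 &&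
           PySem.Int.mod (PySem.List.pyGetD arr ((1 : Int) + ↑k) 0) 2 == 1))
      then (st.1 + 1, max st.2 (st.1 + 1))
      else (1, st.2))
      = fun (st : Int × Int) (k : Nat) =>
          (fun st a b => pvStepA st (pvTrans (a, b))) st (arr.getD k 0) (arr.getD (k + 1) 0) := by
    funext st k
    have e1 : (1 : Int) + ↑k - 1 = ((k : Nat) : Int) := by omega
    have e2 : (1 : Int) + ↑k = (((k + 1 : Nat)) : Int) := by push_cast; omega
    rw [e1, e2, PySem.List.pyGetD_natCast, PySem.List.pyGetD_natCast]
    rfl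
  have hnum : ((arr.length : Int) - 1).toNat = arr.length - 1 := by omega
  rw [hnum, hfun,
      range_getD_zip (fun st a b => pvStepA st (pvTrans (a, b))) arr (1, 1)]
  rw [show ((arr.zip arr.tail).foldl
        (fun (st : Int × Int) (p : Int × Int) =>
          (fun st a b => pvStepA st (pvTrans (a, b))) st p.1 p.2) (1, 1))
      = ((arr.zip arr.tail).map pvTrans).foldl pvStepA (1, 1) from List.foldl_map.symm]

-- B's port is the max gap of the cut list, closed off at len(arr)
theorem pv_redB (arr : List Int) :
    max_even_odd_subarray_alt arr
      = max (pvGm (pvGaps (pvCutsF (pvTs arr) ++ [(arr.length : Int)]))) 1 := by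
  unfold max_even_odd_subarray_alt
  simp only [PySem.List.len_eq]
  rw [PySem.List.pyRange_one, List.foldl_map]
  have hnum : ((arr.length : Int) - 1).toNat = (pvTs arr).length := by
    rw [pv_ts_len]; omega
  rw [hnum]
  have hC : (List.range (pvTs arr).length).foldl
      (fun (acc : List Int) (k : Nat) =>
        if !((PySem.Int.mod (PySem.List.pyGetD arr ((1 : Int) + ↑k - 1) 0) 2 != 0 &&
              PySem.Int.mod (PySem.List.pyGetD arr ((1 : Int) + ↑k) 0) 2 == 0) ||
             (PySem.Int.mod (PySem.List.pyGetD arr ((1 : Int) + ↑k - 1) 0) 2 == 0 &&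
              PySem.Int.mod (PySem.List.pyGetD arr ((1 : Int) + ↑k) 0) 2 == 1))
        then acc ++ [(1 : Int) + ↑k] else acc)
      [0]
      = pvCutsF (pvTs arr) := by
    unfold pvCutsF
    refine PySem.List.foldl_congr_mem _ _ _ _ (fun acc k hk => ?_)
    have hk2 : k < (pvTs arr).length := List.mem_range.mp hk
    have hk3 : k < arr.length - 1 := by rwa [pv_ts_len] at hk2
    have e1 : (1 : Int) + ↑k - 1 = ((k : Nat) : Int) := by omega
    have e2 : (1 : Int) + ↑k = (((k + 1 : Nat)) : Int) := by push_cast; omega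
    have hts : (pvTs arr).getD k false = pvTrans (arr.getD k 0, arr.getD (k + 1) 0) := by
      rw [List.getD_eq_getElem _ _ hk2]
      unfold pvTs
      rw [List.getElem_map, List.getElem_zip]
      have hk4 : k < arr.length := by omega
      have hk5 : k < arr.tail.length := by simp; omega
      rw [List.getD_eq_getElem _ _ hk4, List.getD_eq_getElem _ _ (by omega : k + 1 < arr.length)]
      congr 2
      simp [List.getElem_tail]
    rw [e1, e2, PySem.List.pyGetD_natCast, PySem.List.pyGetD_natCast, hts]
    rw [show (((k + 1 : Nat)) : Int) = (k : Int) + 1 by push_cast; ring]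
    rfl
  rw [hC]
  rfl

-- ===== VERDICT (by name: the statement is the Claim_ definition above) =====
theorem max_even_odd_subarray_spec : Claim_equal_max_even_odd_subarray := by
  intro arr _
  show max_even_odd_subarray arr = max_even_odd_subarray_alt arr
  by_cases h : arr = []
  · subst h; decide
  · rw [pv_redA, pv_redB]
    have hlen : ((pvTs arr).length : Int) + 1 = (arr.length : Int) := by
      have h1 := pv_ts_len arr
      have h2 : arr.length ≠ 0 := by simpa using h
      omega
    rw [← hlen]
    exact (pv_inv (pvTs arr)).2.2.2
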